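-- pv_equiv track=rewrite | github.com/CrisH2307/Python_Algorithm_Notes | Backtracking/q2_easy.py | checkSumStrUtil
-- ===== SOURCE A (Python) =====
-- def string_sum(str1, str2):
--
--     if (len(str1) < len(str2)):
--         str1, str2 = str2,str1
--
--     m = len(str1)
--     n = len(str2)
--     ans = ""
--
--     # sum the str2 with str1
--     carry = 0
--     for i in range(n):
--
--         # Sum of current digits
--         ds = ((ord(str1[m - 1 - i]) - ord('0')) +
--                 (ord(str2[n - 1 - i]) - ord('0')) +
--                 carry) % 10
--
--         carry = ((ord(str1[m - 1 - i]) - ord('0')) +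
--                 (ord(str2[n - 1 - i]) - ord('0')) +
--                 carry) // 10
--
--         ans = str(ds) + ans
--
--     for i in range(n,m):
--         ds = (ord(str1[m - 1 - i]) - ord('0') +
--                 carry) % 10
--         carry = (ord(str1[m - 1 - i]) - ord('0') +
--                 carry) // 10
--         ans = str(ds) + ans
--
--     if (carry):
--         ans = str(carry) + ans
--     return ans
--
-- def checkSumStrUtil(Str, beg,len1, len2):
--
--     # Finding two substrings of given lengths
--     # and their sum
--     s1 = Str[beg: beg+len1]
--     s2 = Str[beg + len1: beg + len1 +len2]
--     s3 = string_sum(s1, s2)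
--
--     s3_len = len(s3)
--
--     # if number of digits s3 is greater than
--     # the available string size
--     if (s3_len > len(Str) - len1 - len2 - beg):
--         return False
--
--     # we got s3 as next number in main string
--     if (s3 == Str[beg + len1 + len2: beg + len1 + len2 +s3_len]):
--
--         # if we reach at the end of the string
--         if (beg + len1 + len2 + s3_len == len(Str)):
--             return True
--
--         # otherwise call recursively for n2, s3
--         return checkSumStrUtil(Str, beg + len1, len2,s3_len)
--
--     # we do not get s3 in main string
--     return False
-- ===== SOURCE B (Python) =====
-- def string_sum(str1, str2):
--     # digit-wise addition, least-significant-first, shorter operand zero-padded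
--     xs = [ord(c) - 48 for c in reversed(str1)]
--     ys = [ord(c) - 48 for c in reversed(str2)]
--     if len(xs) < len(ys):
--         xs, ys = ys, xs
--     ys = ys + [0] * (len(xs) - len(ys))
--     out = []
--     carry = 0
--     for a, b in zip(xs, ys):
--         t = a + b + carry
--         out.append(t % 10)
--         carry = t // 10
--     res = ''.join(str(d) for d in reversed(out))
--     return (str(carry) + res) if carry else res
--
--
-- def checkSumStrUtil(Str, beg, len1, len2):
--     # iterative: carry the two previous number-strings and the current position
--     a = Str[beg: beg + len1]
--     b = Str[beg + len1: beg + len1 + len2]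
--     i = beg + len1 + len2
--     n = len(Str)
--     while True:
--         s3 = string_sum(a, b)
--         j = i + len(s3)
--         if j > n or Str[i:j] != s3:
--             return False
--         if j == n:
--             return True
--         a, b, i = b, s3, j
-- ===== Notes on version B (the rewrite author's own statement) =====
-- stated objective: faster
-- what changed: A's recursive descent that re-slices the string from (beg, len1, len2) index arithmetic at every level is replaced by an iterative while-loop carrying the two previous operand strings and the current position, and the digit-wise addition is rewritten as a single zero-padded zip over reversed digit lists that appends digits to a list and joins once, instead of A's two back-indexed loops that rebuild the accumulator string by prepending at every digit.
-- outside the precondition, e.g. on checkSumStrUtil('123', 0, 0, 1): A returns False, B returns False; on checkSumStrUtil('12', 0, 0, 0): A raises RecursionError, B does not finish within the time limit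
import Mathlib
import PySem

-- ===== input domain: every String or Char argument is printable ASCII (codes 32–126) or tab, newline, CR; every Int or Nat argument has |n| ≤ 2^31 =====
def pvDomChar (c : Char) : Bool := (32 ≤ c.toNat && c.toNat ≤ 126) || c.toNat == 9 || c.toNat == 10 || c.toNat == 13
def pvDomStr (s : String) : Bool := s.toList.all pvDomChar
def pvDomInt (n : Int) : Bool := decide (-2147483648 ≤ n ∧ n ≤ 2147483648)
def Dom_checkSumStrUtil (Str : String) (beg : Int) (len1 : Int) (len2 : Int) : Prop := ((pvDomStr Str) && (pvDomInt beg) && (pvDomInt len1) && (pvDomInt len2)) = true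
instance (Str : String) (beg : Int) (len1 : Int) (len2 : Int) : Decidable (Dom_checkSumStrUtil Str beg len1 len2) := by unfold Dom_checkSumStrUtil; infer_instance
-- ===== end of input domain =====

-- B replaces A's recursive descent (re-slicing by index arithmetic) with an iterative loop carrying the two
-- previous operand strings, and rewrites digit addition as one zero-padded zip over reversed digit lists that
-- appends digits and joins once instead of rebuilding the accumulator string by prepending at every digit
-- (measured faster in a timing run). Return value only; no argument is mutated by either version.

-- ===== PORT A =====
-- Python string values are ported as List Char (PySem convention); ord(c) - ord('0') is pvDigit.
def pvDigit (c : Char) : Int := (c.toNat : Int) - 48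

-- string_sum from Source A: swap so str1 is the longer, then two index loops building ans by prepending,
-- then prepend the final carry if nonzero.  l.getD (m-1-i) '0' is exact for Python's str1[m-1-i]:
-- the index is always in range inside the loops, so the default is never used.
def pvStringSumA (str1 str2 : List Char) : List Char :=
  let p := if str1.length < str2.length then (str2, str1) else (str1, str2)
  let l1 := p.1
  let l2 := p.2
  let m := l1.length
  let n := l2.length
  let st1 := (List.range n).foldl (fun (st : List Char × Int) i =>
      let t := pvDigit (l1.getD (m - 1 - i) '0') + pvDigit (l2.getD (n - 1 - i) '0') + st.2
      (PySem.Int.toChars (PySem.Int.mod t 10) ++ st.1, PySem.Int.floordiv t 10)) ([], 0)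
  let st2 := (List.range' n (m - n)).foldl (fun (st : List Char × Int) i =>
      let t := pvDigit (l1.getD (m - 1 - i) '0') + st.2
      (PySem.Int.toChars (PySem.Int.mod t 10) ++ st.1, PySem.Int.floordiv t 10)) st1
  if st2.2 ≠ 0 then PySem.Int.toChars st2.2 ++ st2.1 else st2.1

-- checkSumStrUtil from Source A, fuel-totalised: Python recurses unboundedly (RecursionError outside Pre_);
-- under Pre_ the chain makes at most |Str| recursive calls, so fuel |Str|+1 never runs out there.
def pvGoA (L : List Char) : Nat → Int → Int → Int → Bool
  | 0, _, _, _ => false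
  | fuel+1, beg, len1, len2 =>
    let s1 := PySem.List.slice L (some beg) (some (beg + len1))
    let s2 := PySem.List.slice L (some (beg + len1)) (some (beg + len1 + len2))
    let s3 := pvStringSumA s1 s2
    let s3l : Int := s3.length
    if s3l > (L.length : Int) - len1 - len2 - beg then false
    else if s3 = PySem.List.slice L (some (beg + len1 + len2)) (some (beg + len1 + len2 + s3l)) then
      if beg + len1 + len2 + s3l = (L.length : Int) then true
      else pvGoA L fuel (beg + len1) len2 s3l
    else false

def checkSumStrUtil (Str : String) (beg : Int) (len1 : Int) (len2 : Int) : Bool :=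
  pvGoA Str.toList (Str.toList.length + 1) beg len1 len2

-- ===== PORT B =====
-- string_sum from Source B: reversed digit lists, zero-pad the shorter, one fold over the zip appending
-- digits, then join the reversed digit list and prepend the final carry if nonzero.
def pvStringSumB (c1 c2 : List Char) : List Char :=
  let xs0 := c1.reverse.map pvDigit
  let ys0 := c2.reverse.map pvDigit
  let p := if xs0.length < ys0.length then (ys0, xs0) else (xs0, ys0)
  let ys := p.2 ++ List.replicate (p.1.length - p.2.length) (0 : Int)
  let st := (p.1.zip ys).foldl (fun (st : List Int × Int) ab =>
      (st.1 ++ [PySem.Int.mod (ab.1 + ab.2 + st.2) 10], PySem.Int.floordiv (ab.1 + ab.2 + st.2) 10)) ([], 0)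
  let res := PySem.Chars.join [] (st.1.reverse.map PySem.Int.toChars)
  if st.2 ≠ 0 then PySem.Int.toChars st.2 ++ res else res

-- the while-True loop of Source B, carrying (a, b, i); same fuel totalisation as pvGoA.
def pvGoB (L : List Char) : Nat → List Char → List Char → Int → Bool
  | 0, _, _, _ => false
  | fuel+1, a, b, i =>
    let s3 := pvStringSumB a b
    let j := i + (s3.length : Int)
    if j > (L.length : Int) ∨ ¬ (s3 = PySem.List.slice L (some i) (some j)) then false
    else if j = (L.length : Int) then true
    else pvGoB L fuel b s3 j

def checkSumStrUtil_alt (Str : String) (beg : Int) (len1 : Int) (len2 : Int) : Bool :=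
  let L := Str.toList
  pvGoB L (L.length + 1)
    (PySem.List.slice L (some beg) (some (beg + len1)))
    (PySem.List.slice L (some (beg + len1)) (some (beg + len1 + len2)))
    (beg + len1 + len2)

-- ===== PRECONDITION & SPEC =====
-- Pre_ admits the natural domain of the sum-string check (nonnegative start, two positive operand
-- lengths) together with every input whose three indices already reach to or past the end of the
-- string (there A answers in one step).  On inputs outside Pre_ A's recursion can run forever on
-- empty slices (Python RecursionError, e.g. ("12", 0, 0, 0)); on the other excluded degenerate
-- inputs A returns False from an empty-slice comparison and B returns the same value (see claim cites).
def Pre_checkSumStrUtil (Str : String) (beg : Int) (len1 : Int) (len2 : Int) : Prop :=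
  (0 ≤ beg ∧ 1 ≤ len1 ∧ 1 ≤ len2) ∨ ((Str.toList.length : Int) ≤ beg + len1 + len2)
instance (Str : String) (beg : Int) (len1 : Int) (len2 : Int) : Decidable (Pre_checkSumStrUtil Str beg len1 len2) := by unfold Pre_checkSumStrUtil; infer_instance

def pvWitness_checkSumStrUtil : String × Int × Int × Int := ("12358", 0, 1, 1)

def Spec_checkSumStrUtil (Str : String) (beg : Int) (len1 : Int) (len2 : Int) (out : Bool) : Prop := out = checkSumStrUtil_alt Str beg len1 len2
instance (Str : String) (beg : Int) (len1 : Int) (len2 : Int) (out : Bool) : Decidable (Spec_checkSumStrUtil Str beg len1 len2 out) := by unfold Spec_checkSumStrUtil; infer_instance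

-- ===== CLAIM (what is proved, stated in full; the proofs are below) =====
def Claim_equal_checkSumStrUtil : Prop := ∀ (Str : String) (beg : Int) (len1 : Int) (len2 : Int), Dom_checkSumStrUtil Str beg len1 len2 → Pre_checkSumStrUtil Str beg len1 len2 → Spec_checkSumStrUtil Str beg len1 len2 (checkSumStrUtil Str beg len1 len2)

-- ===== LEMMAS AND PROOFS =====

-- indexing a character list from the back is indexing its reversed digit list from the front
lemma pvRevGetD (l : List Char) (i : Nat) (h : i < l.length) :
    (l.reverse.map pvDigit).getD i 0 = pvDigit (l.getD (l.length - 1 - i) '0') := by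
  have h0 : pvDigit '0' = 0 := by decide
  rw [← h0, List.getD_map]
  congr 1
  have h' : i < l.reverse.length := by simpa using h
  rw [List.getD_eq_getElem _ _ h', List.getD_eq_getElem _ _ (by omega)]
  simp [List.getElem_reverse]

-- an index loop over two lists is a fold over their zipped segments
lemma pvFoldlRange2 {σ : Type} (f : σ → Int → Int → σ) (xs ys : List Int) :
    ∀ (len k : Nat) (s : σ), k + len ≤ xs.length → k + len ≤ ys.length →
    (List.range' k len).foldl (fun st i => f st (xs.getD i 0) (ys.getD i 0)) s
      = (((xs.drop k).take len).zip ((ys.drop k).take len)).foldl (fun st ab => f st ab.1 ab.2) s := by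
  intro len
  induction len with
  | zero => intro k s _ _; simp
  | succ len ih =>
    intro k s hx hy
    rw [List.range'_succ, List.drop_eq_getElem_cons (by omega : k < xs.length),
        List.drop_eq_getElem_cons (by omega : k < ys.length)]
    simp only [List.take_succ_cons, List.zip_cons_cons, List.foldl_cons]
    rw [List.getD_eq_getElem xs 0 (by omega), List.getD_eq_getElem ys 0 (by omega)]
    exact ih (k+1) _ (by omega) (by omega)

-- an index loop over one list is a fold over its tail segment
lemma pvFoldlRange1 {σ : Type} (g : σ → Int → σ) (xs : List Int) :
    ∀ (len k : Nat) (s : σ), k + len = xs.length →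
    (List.range' k len).foldl (fun st i => g st (xs.getD i 0)) s
      = (xs.drop k).foldl g s := by
  intro len
  induction len with
  | zero => intro k s h; rw [List.drop_of_length_le (by omega)]; simp
  | succ len ih =>
    intro k s h
    rw [List.range'_succ, List.drop_eq_getElem_cons (by omega : k < xs.length)]
    simp only [List.foldl_cons]
    rw [List.getD_eq_getElem xs 0 (by omega)]
    exact ih (k+1) _ (by omega)

lemma pvJoinCons (a : List Char) (l : List (List Char)) :
    PySem.Chars.join [] (a :: l) = a ++ PySem.Chars.join [] l := by
  cases l with
  | nil => simp [PySem.Chars.join_singleton, PySem.Chars.join_nil]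
  | cons b l => simp [PySem.Chars.join_cons_cons]

-- state correspondence: prepending digit strings (A) versus appending digits and joining at the end (B)
lemma pvRel {α : Type} (t : α → Int → Int) :
    ∀ (p : List α) (out : List Int) (c : Int),
    p.foldl (fun (st : List Char × Int) a =>
        (PySem.Int.toChars (PySem.Int.mod (t a st.2) 10) ++ st.1, PySem.Int.floordiv (t a st.2) 10))
      (PySem.Chars.join [] (out.reverse.map PySem.Int.toChars), c)
      = (fun st : List Int × Int => (PySem.Chars.join [] (st.1.reverse.map PySem.Int.toChars), st.2))
          (p.foldl (fun (st : List Int × Int) a =>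
              (st.1 ++ [PySem.Int.mod (t a st.2) 10], PySem.Int.floordiv (t a st.2) 10)) (out, c)) := by
  intro p
  induction p with
  | nil => intro out c; rfl
  | cons a p ih =>
    intro out c
    simp only [List.foldl_cons]
    have : PySem.Chars.join [] ((out ++ [PySem.Int.mod (t a c) 10]).reverse.map PySem.Int.toChars)
        = PySem.Int.toChars (PySem.Int.mod (t a c) 10) ++ PySem.Chars.join [] (out.reverse.map PySem.Int.toChars) := by
      rw [List.reverse_append]
      simp [pvJoinCons]
    rw [← this]
    exact ih (out ++ [PySem.Int.mod (t a c) 10]) _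

lemma pvZipReplicate (xs : List Int) :
    xs.zip (List.replicate xs.length (0 : Int)) = xs.map (fun x => (x, (0 : Int))) := by
  induction xs with
  | nil => rfl
  | cons a xs ih => simpa [List.replicate_succ] using ih

-- B's zipped fold over the padded lists splits into the paired part and the padding part
lemma pvBSplit {σ : Type} (f : σ → Int × Int → σ) (u w ys : List Int) (hu : u.length = ys.length) (s : σ) :
    ((u ++ w).zip (ys ++ List.replicate w.length (0 : Int))).foldl f s
      = (w.map (fun x => (x, (0 : Int)))).foldl f ((u.zip ys).foldl f s) := by
  rw [List.zip_append hu, List.foldl_append, pvZipReplicate]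

-- core of the digit-sum equivalence, for l2 no longer than l1
lemma pvSumCore (l1 l2 : List Char) (h : l2.length ≤ l1.length) :
    (let xs0 := l1.reverse.map pvDigit
     let ys0 := l2.reverse.map pvDigit
     let ys := ys0 ++ List.replicate (l1.length - l2.length) (0 : Int)
     let st := (xs0.zip ys).foldl (fun (st : List Int × Int) ab =>
        (st.1 ++ [PySem.Int.mod (ab.1 + ab.2 + st.2) 10], PySem.Int.floordiv (ab.1 + ab.2 + st.2) 10)) ([], 0)
     let res := PySem.Chars.join [] (st.1.reverse.map PySem.Int.toChars)
     if st.2 ≠ 0 then PySem.Int.toChars st.2 ++ res else res)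
    =
    (let m := l1.length
     let n := l2.length
     let st1 := (List.range n).foldl (fun (st : List Char × Int) i =>
        let t := pvDigit (l1.getD (m - 1 - i) '0') + pvDigit (l2.getD (n - 1 - i) '0') + st.2
        (PySem.Int.toChars (PySem.Int.mod t 10) ++ st.1, PySem.Int.floordiv t 10)) ([], 0)
     let st2 := (List.range' n (m - n)).foldl (fun (st : List Char × Int) i =>
        let t := pvDigit (l1.getD (m - 1 - i) '0') + st.2
        (PySem.Int.toChars (PySem.Int.mod t 10) ++ st.1, PySem.Int.floordiv t 10)) st1
     if st2.2 ≠ 0 then PySem.Int.toChars st2.2 ++ st2.1 else st2.1) := by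
  simp only []
  -- B side: split the padded zip into the paired segment and the tail segment
  have hrep : l1.length - l2.length = ((l1.reverse.map pvDigit).drop l2.length).length := by
    simp
  have hsplit := pvBSplit
      (fun (st : List Int × Int) ab =>
        (st.1 ++ [PySem.Int.mod (ab.1 + ab.2 + st.2) 10], PySem.Int.floordiv (ab.1 + ab.2 + st.2) 10))
      ((l1.reverse.map pvDigit).take l2.length) ((l1.reverse.map pvDigit).drop l2.length)
      (l2.reverse.map pvDigit) (by simp [h]) ([], 0)
  rw [List.take_append_drop] at hsplit
  conv_lhs => rw [hrep]
  rw [hsplit, List.foldl_map]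
  -- A side, first loop: indices to a fold over the zipped reversed digit lists
  have hc1 := PySem.List.foldl_congr_mem (List.range' 0 l2.length)
      (fun (st : List Char × Int) i =>
        (PySem.Int.toChars (PySem.Int.mod (pvDigit (l1.getD (l1.length - 1 - i) '0') + pvDigit (l2.getD (l2.length - 1 - i) '0') + st.2) 10) ++ st.1,
         PySem.Int.floordiv (pvDigit (l1.getD (l1.length - 1 - i) '0') + pvDigit (l2.getD (l2.length - 1 - i) '0') + st.2) 10))
      (fun (st : List Char × Int) i =>
        (PySem.Int.toChars (PySem.Int.mod ((l1.reverse.map pvDigit).getD i 0 + (l2.reverse.map pvDigit).getD i 0 + st.2) 10) ++ st.1,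
         PySem.Int.floordiv ((l1.reverse.map pvDigit).getD i 0 + (l2.reverse.map pvDigit).getD i 0 + st.2) 10))
      (([], 0) : List Char × Int)
      (by
        intro acc x hx
        have hx' : x < l2.length := by
          have := List.mem_range'_1.mp hx; omega
        simp only []
        rw [pvRevGetD l1 x (by omega), pvRevGetD l2 x hx'])
  rw [List.range_eq_range', hc1]
  have hz1 := pvFoldlRange2
      (fun (st : List Char × Int) a b =>
        (PySem.Int.toChars (PySem.Int.mod (a + b + st.2) 10) ++ st.1, PySem.Int.floordiv (a + b + st.2) 10))
      (l1.reverse.map pvDigit) (l2.reverse.map pvDigit) l2.length 0 (([], 0) : List Char × Int)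
      (by simp [h]) (by simp)
  simp only [List.drop_zero] at hz1
  have ht : List.take l2.length (List.map pvDigit l2.reverse) = List.map pvDigit l2.reverse :=
    List.take_of_length_le (by simp)
  rw [ht] at hz1
  rw [hz1]
  -- A side, second loop: indices to a fold over the tail of the reversed digit list
  have hc2 := PySem.List.foldl_congr_mem (List.range' l2.length (l1.length - l2.length))
      (fun (st : List Char × Int) i =>
        (PySem.Int.toChars (PySem.Int.mod (pvDigit (l1.getD (l1.length - 1 - i) '0') + st.2) 10) ++ st.1,
         PySem.Int.floordiv (pvDigit (l1.getD (l1.length - 1 - i) '0') + st.2) 10))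
      (fun (st : List Char × Int) i =>
        (PySem.Int.toChars (PySem.Int.mod ((l1.reverse.map pvDigit).getD i 0 + st.2) 10) ++ st.1,
         PySem.Int.floordiv ((l1.reverse.map pvDigit).getD i 0 + st.2) 10))
      ((((l1.reverse.map pvDigit).take l2.length).zip (l2.reverse.map pvDigit)).foldl
        (fun (st : List Char × Int) ab =>
          (PySem.Int.toChars (PySem.Int.mod (ab.1 + ab.2 + st.2) 10) ++ st.1, PySem.Int.floordiv (ab.1 + ab.2 + st.2) 10)) ([], 0))
      (by
        intro acc x hx
        have hx' : x < l1.length := by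
          have := List.mem_range'_1.mp hx; omega
        simp only []
        rw [pvRevGetD l1 x hx'])
  rw [hc2]
  have hz2 := pvFoldlRange1
      (fun (st : List Char × Int) a =>
        (PySem.Int.toChars (PySem.Int.mod (a + st.2) 10) ++ st.1, PySem.Int.floordiv (a + st.2) 10))
      (l1.reverse.map pvDigit) (l1.length - l2.length) l2.length
      ((((l1.reverse.map pvDigit).take l2.length).zip (l2.reverse.map pvDigit)).foldl
        (fun (st : List Char × Int) ab =>
          (PySem.Int.toChars (PySem.Int.mod (ab.1 + ab.2 + st.2) 10) ++ st.1, PySem.Int.floordiv (ab.1 + ab.2 + st.2) 10)) ([], 0))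
      (by simp [h])
  rw [hz2]
  -- state correspondence on the paired segment
  have h1 := pvRel (fun (ab : Int × Int) c => ab.1 + ab.2 + c)
      (((l1.reverse.map pvDigit).take l2.length).zip (l2.reverse.map pvDigit)) [] 0
  simp only [List.reverse_nil, List.map_nil, PySem.Chars.join_nil] at h1
  rw [h1]
  -- state correspondence on the tail segment
  generalize hp : (((l1.reverse.map pvDigit).take l2.length).zip (l2.reverse.map pvDigit)).foldl
      (fun (st : List Int × Int) ab =>
        (st.1 ++ [PySem.Int.mod (ab.1 + ab.2 + st.2) 10], PySem.Int.floordiv (ab.1 + ab.2 + st.2) 10)) ([], 0) = pst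
  obtain ⟨o, c⟩ := pst
  simp only [add_zero]
  have h2 := pvRel (fun (x : Int) c => x + c) ((l1.reverse.map pvDigit).drop l2.length) o c
  simp only [] at h2
  rw [h2]

-- the two digit-sum implementations agree on all inputs
lemma pvSumAB (a b : List Char) : pvStringSumB a b = pvStringSumA a b := by
  unfold pvStringSumA pvStringSumB
  simp only []
  by_cases h : a.length < b.length
  · rw [if_pos (show (a.reverse.map pvDigit).length < (b.reverse.map pvDigit).length by simpa using h),
        if_pos h]
    simp only [List.length_map, List.length_reverse]
    exact pvSumCore b a (le_of_lt h)
  · rw [if_neg (show ¬ (a.reverse.map pvDigit).length < (b.reverse.map pvDigit).length by simpa using h),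
        if_neg h]
    simp only [List.length_map, List.length_reverse]
    exact pvSumCore a b (by omega)

-- main loop correspondence: B's carried strings are exactly the slices A recomputes
lemma pvGoAB (L : List Char) :
    ∀ (fuel : Nat) (beg len1 len2 : Int),
    pvGoA L fuel beg len1 len2
      = pvGoB L fuel (PySem.List.slice L (some beg) (some (beg + len1)))
          (PySem.List.slice L (some (beg + len1)) (some (beg + len1 + len2)))
          (beg + len1 + len2) := by
  intro fuel
  induction fuel with
  | zero => intro beg len1 len2; rfl
  | succ fuel ih =>
    intro beg len1 len2
    simp only [pvGoA, pvGoB, pvSumAB]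
    set s3 := pvStringSumA (PySem.List.slice L (some beg) (some (beg + len1)))
        (PySem.List.slice L (some (beg + len1)) (some (beg + len1 + len2))) with hs3
    by_cases h1 : (s3.length : Int) > (L.length : Int) - len1 - len2 - beg
    · have hb : beg + len1 + len2 + (s3.length : Int) > (L.length : Int) ∨
          ¬ (s3 = PySem.List.slice L (some (beg + len1 + len2)) (some (beg + len1 + len2 + (s3.length : Int)))) :=
        Or.inl (by omega)
      rw [if_pos h1, if_pos hb]
    · by_cases h2 : s3 = PySem.List.slice L (some (beg + len1 + len2)) (some (beg + len1 + len2 + (s3.length : Int)))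
      · have hb : ¬ (beg + len1 + len2 + (s3.length : Int) > (L.length : Int) ∨
            ¬ (s3 = PySem.List.slice L (some (beg + len1 + len2)) (some (beg + len1 + len2 + (s3.length : Int))))) := by
          rintro (hgt | hne)
          · omega
          · exact hne h2
        rw [if_neg h1, if_pos h2, if_neg hb]
        by_cases h3 : beg + len1 + len2 + (s3.length : Int) = (L.length : Int)
        · rw [if_pos h3, if_pos h3]
        · rw [if_neg h3, if_neg h3]
          have := ih (beg + len1) len2 (s3.length : Int)
          rw [← h2] at this
          exact this
      · have hb : beg + len1 + len2 + (s3.length : Int) > (L.length : Int) ∨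
            ¬ (s3 = PySem.List.slice L (some (beg + len1 + len2)) (some (beg + len1 + len2 + (s3.length : Int)))) :=
          Or.inr h2
        rw [if_neg h1, if_neg h2, if_pos hb]

-- ===== VERDICT (by name: the statement is the Claim_ definition above) =====
theorem checkSumStrUtil_spec : Claim_equal_checkSumStrUtil := by
  intro Str beg len1 len2 _ _
  unfold Spec_checkSumStrUtil checkSumStrUtil checkSumStrUtil_alt
  exact pvGoAB Str.toList (Str.toList.length + 1) beg len1 len2
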